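-- pv_equiv track=rewrite | github.com/BinaryOutlook/SemantrisPlus | game_logic.py | _used_index_set
-- ===== SOURCE A (Python) =====
-- def _used_index_set(used_mask: str) -> set[int]:
--     value = int(used_mask or "0", 16)
--     indices: set[int] = set()
--     bit_index = 0
--
--     while value:
--         if value & 1:
--             indices.add(bit_index)
--         value >>= 1
--         bit_index += 1
--
--     return indices
-- ===== SOURCE B (Python) =====
-- _NIBBLE_BITS = (
--     (), (0,), (1,), (0, 1),
--     (2,), (0, 2), (1, 2), (0, 1, 2),
--     (3,), (0, 3), (1, 3), (0, 1, 3),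
--     (2, 3), (0, 2, 3), (1, 2, 3), (0, 1, 2, 3),
-- )
--
--
-- def _used_index_set(used_mask: str) -> set[int]:
--     # One pass over the hex string, right to left: each hex digit contributes
--     # its set-bit offsets (from a 16-entry table) at the digit's bit position.
--     indices: set[int] = set()
--     base = 0
--     for ch in reversed(used_mask):
--         for off in _NIBBLE_BITS[int(ch, 16)]:
--             indices.add(base + off)
--         base += 4
--     return indices
-- ===== Notes on version B (the rewrite author's own statement) =====
-- stated objective: faster
-- what changed: Instead of parsing the whole hex string into one big integer and shifting it bit by bit, B makes a single right-to-left pass over the string and reads each hex digit's set-bit offsets from a 16-entry table, so no big-integer arithmetic occurs at all.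
-- outside the precondition, e.g. on _used_index_set(' 7 '): A returns {0, 1, 2}, B raises ValueError; on _used_index_set('+5'): A returns {0, 2}, B raises ValueError; on _used_index_set('0x10'): A returns {4}, B raises ValueError
import Mathlib
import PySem

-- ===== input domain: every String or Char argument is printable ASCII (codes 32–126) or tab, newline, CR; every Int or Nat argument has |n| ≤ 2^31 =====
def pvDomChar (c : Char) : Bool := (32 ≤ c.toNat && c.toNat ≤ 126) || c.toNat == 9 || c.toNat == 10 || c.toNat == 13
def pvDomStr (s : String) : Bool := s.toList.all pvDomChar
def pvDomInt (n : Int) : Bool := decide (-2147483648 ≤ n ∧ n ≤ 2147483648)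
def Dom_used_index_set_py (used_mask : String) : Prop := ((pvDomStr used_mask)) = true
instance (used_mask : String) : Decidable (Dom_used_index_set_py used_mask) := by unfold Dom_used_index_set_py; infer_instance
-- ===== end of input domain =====

-- B replaces A's big-integer parse + bit-by-bit shift loop with a single right-to-left
-- pass over the hex string using a 16-entry table of each digit's set-bit offsets (faster:
-- no big-integer arithmetic).

-- ===== PORT A =====
-- value of one hex digit (0 on non-hex characters; Pre_ excludes those, where Python raises)
def hexVal (c : Char) : Nat :=
  if 48 ≤ c.toNat ∧ c.toNat ≤ 57 then c.toNat - 48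
  else if 97 ≤ c.toNat ∧ c.toNat ≤ 102 then c.toNat - 87
  else if 65 ≤ c.toNat ∧ c.toNat ≤ 70 then c.toNat - 55
  else 0

-- int(s, 16): value of the digit list, least-significant digit first
def parseHexLE : List Char → Nat
  | [] => 0
  | c :: r => hexVal c + 16 * parseHexLE r

-- A's while loop: shift the value right one bit at a time, recording set-bit indices
def loopA (value : Nat) (bit : Int) (acc : List Int) : List Int :=
  if h : value = 0 then acc
  else loopA (value / 2) (bit + 1) (if value % 2 = 1 then PySem.Set.add acc bit else acc)
termination_by value
decreasing_by omega

def used_index_set_py (used_mask : String) : List Int :=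
  let s := if used_mask = "" then "0" else used_mask
  loopA (parseHexLE s.toList.reverse) 0 []

-- ===== PORT B =====
-- _NIBBLE_BITS: set-bit offsets of each hex digit
def nibbleBits : Nat → List Nat
  | 0 => [] | 1 => [0] | 2 => [1] | 3 => [0, 1]
  | 4 => [2] | 5 => [0, 2] | 6 => [1, 2] | 7 => [0, 1, 2]
  | 8 => [3] | 9 => [0, 3] | 10 => [1, 3] | 11 => [0, 1, 3]
  | 12 => [2, 3] | 13 => [0, 2, 3] | 14 => [1, 2, 3] | 15 => [0, 1, 2, 3]
  | _ => []

-- B's loop over reversed(used_mask): table lookup per digit, offsets shifted by base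
def loopB : List Char → Int → List Int → List Int
  | [], _, acc => acc
  | c :: rest, base, acc =>
      loopB rest (base + 4)
        ((nibbleBits (hexVal c)).foldl (fun a off => PySem.Set.add a (base + (off : Int))) acc)

def used_index_set_py_alt (used_mask : String) : List Int :=
  loopB used_mask.toList.reverse 0 []

-- ===== PRECONDITION & SPEC =====
-- Pre_ admits exactly the strings of plain hex digits (possibly empty). Outside it Python A
-- raises ValueError (non-hex character) or, on a parsed negative value, never terminates;
-- it also excludes the few decorated forms int(s,16) still accepts (leading/trailing
-- whitespace, a sign, '0x', '_' separators), on which A returns but B raises ValueError —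
-- see the cites in claim.json.
def isHexCh (c : Char) : Bool :=
  (48 ≤ c.toNat && c.toNat ≤ 57) || (97 ≤ c.toNat && c.toNat ≤ 102) || (65 ≤ c.toNat && c.toNat ≤ 70)
def Pre_used_index_set_py (used_mask : String) : Prop :=
  used_mask.toList.all isHexCh = true
instance (used_mask : String) : Decidable (Pre_used_index_set_py used_mask) := by
  unfold Pre_used_index_set_py; infer_instance

def pvWitness_used_index_set_py : String := "1a2B"

def Spec_used_index_set_py (used_mask : String) (out : List Int) : Prop := out = used_index_set_py_alt used_mask
instance (used_mask : String) (out : List Int) : Decidable (Spec_used_index_set_py used_mask out) := by unfold Spec_used_index_set_py; infer_instance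

-- ===== CLAIM (what is proved, stated in full; the proofs are below) =====
def Claim_equal_used_index_set_py : Prop := ∀ (used_mask : String), Dom_used_index_set_py used_mask → Pre_used_index_set_py used_mask → Spec_used_index_set_py used_mask (used_index_set_py used_mask)

-- ===== LEMMAS AND PROOFS =====

theorem hexVal_lt (c : Char) : hexVal c < 16 := by
  unfold hexVal; split_ifs <;> omega

-- one generic halving step of A's loop (holds also when the value is 0)
theorem loopA_stepG (e m : Nat) (b : Int) (acc : List Int) :
    loopA (e + 2 * m) b acc
      = loopA (e / 2 + m) (b + 1) (if e % 2 = 1 then PySem.Set.add acc b else acc) := by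
  by_cases h : e + 2 * m = 0
  · have he : e = 0 := by omega
    have hm : m = 0 := by omega
    subst he; subst hm
    simp [loopA]
  · rw [loopA, dif_neg h]
    have h1 : (e + 2 * m) / 2 = e / 2 + m := by omega
    have h2 : (e + 2 * m) % 2 = e % 2 := by omega
    rw [h1, h2]

-- four halving steps of A consume one hex digit and produce exactly B's table additions
theorem loopA_digit (d : Nat) (hd : d < 16) (v : Nat) (b : Int) (acc : List Int) :
    loopA (d + 16 * v) b acc
      = loopA v (b + 4)
          ((nibbleBits d).foldl (fun a off => PySem.Set.add a (b + (off : Int))) acc) := by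
  have e1 : d + 16 * v = d + 2 * (8 * v) := by ring
  have e2 : d / 2 + 8 * v = d / 2 + 2 * (4 * v) := by ring
  have e3 : d / 2 / 2 + 4 * v = d / 2 / 2 + 2 * (2 * v) := by ring
  have e4 : d / 2 / 2 / 2 + 2 * v = d / 2 / 2 / 2 + 2 * (1 * v) := by ring
  rw [e1, loopA_stepG, e2, loopA_stepG, e3, loopA_stepG, e4, loopA_stepG]
  have hv : d / 2 / 2 / 2 / 2 + 1 * v = v := by omega
  rw [hv]
  have hb : b + 1 + 1 + 1 + 1 = b + 4 := by ring
  rw [hb]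
  congr 1
  interval_cases d <;> simp <;> norm_num [nibbleBits] <;> ring_nf

-- A's bit loop on the parsed value equals B's digit loop on the digit list
theorem loopA_eq_loopB (l : List Char) (b : Int) (acc : List Int) :
    loopA (parseHexLE l) b acc = loopB l b acc := by
  induction l generalizing b acc with
  | nil => simp [parseHexLE, loopA, loopB]
  | cons c rest ih =>
      show loopA (hexVal c + 16 * parseHexLE rest) b acc = _
      rw [loopA_digit (hexVal c) (hexVal_lt c)]
      exact ih _ _

-- ===== VERDICT (by name: the statement is the Claim_ definition above) =====
theorem used_index_set_py_spec : Claim_equal_used_index_set_py := by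
  intro s _ _
  unfold Spec_used_index_set_py used_index_set_py used_index_set_py_alt
  by_cases hs : s = ""
  · subst hs
    show loopA (parseHexLE ['0']) 0 [] = loopB [] 0 []
    rw [show parseHexLE ['0'] = 0 from rfl, loopA]
    simp [loopB]
  · simp only [if_neg hs]
    exact loopA_eq_loopB _ 0 []
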